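-- pv_equiv track=rewrite | github.com/bsouthward/babel-iterator | powerset_cardinality.py | powerset_cardinality
-- ===== SOURCE A (Python) =====
-- from itertools import combinations, chain
--
-- def powerset_cardinality(n):
-- 	# n is number of elements to combine from
-- 	s = [y for y in range(0,n)]
--
-- 	# thank you Stefan Falk for the powerset function
-- 	def powerset(s):
-- 		x = len(s)
-- 		masks = [1 << i for i in range(x)]
-- 		for i in range(1 << x):
-- 			yield list(ss for mask, ss in zip(masks, s) if i & mask)
--
-- 	# alternative
-- 	def powerset2(iterable):
-- 		return chain.from_iterable(combinations(list(iterable), r)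
-- 			 for r in range(len(s)+1))
--
-- 	return len(list(powerset2(s)))
-- ===== SOURCE B (Python) =====
-- def powerset_cardinality(n):
-- 	# n is number of elements to combine from
-- 	result = 1
-- 	for _ in range(n):
-- 		result *= 2
-- 	return result
-- ===== Notes on version B (the rewrite author's own statement) =====
-- stated objective: faster
-- what changed: B replaces A's enumeration of every subset (chain of combinations over all sizes, then len) with an O(n) doubling loop that doubles an accumulator once per element.
import Mathlib
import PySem

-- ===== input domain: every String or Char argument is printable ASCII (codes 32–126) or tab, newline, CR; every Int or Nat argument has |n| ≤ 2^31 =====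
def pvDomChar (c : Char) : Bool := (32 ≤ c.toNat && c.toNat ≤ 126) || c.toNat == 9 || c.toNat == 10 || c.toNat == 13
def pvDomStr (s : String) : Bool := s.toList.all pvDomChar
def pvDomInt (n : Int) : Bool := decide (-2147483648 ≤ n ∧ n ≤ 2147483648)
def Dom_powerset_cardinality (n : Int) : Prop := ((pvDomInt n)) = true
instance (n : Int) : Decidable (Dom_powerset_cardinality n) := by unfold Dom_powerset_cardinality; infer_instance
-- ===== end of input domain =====

-- B replaces A's subset enumeration with a linear doubling loop (objective: faster; asymptotic change; unverified in a timing run, which could not run A at the largest size).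
-- ===== PORT A =====
-- itertools.combinations(l, r) on a list, in Python's order (first element taken first)
def pvCombos : List Int → Nat → List (List Int)
  | _, 0 => [[]]
  | [], _+1 => []
  | x :: xs, r+1 => (pvCombos xs r).map (fun c => x :: c) ++ pvCombos xs (r+1)

-- A: s = list(range(0, n)); return len(list(chain.from_iterable(combinations(s, r) for r in range(len(s)+1))))
def powerset_cardinality (n : Int) : Int :=
  let s := PySem.List.pyRange 0 n 1
  (((List.range (s.length + 1)).flatMap (fun r => pvCombos s r)).length : Int)

-- ===== PORT B =====
-- B: result = 1; for _ in range(n): result *= 2; return result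
def powerset_cardinality_alt (n : Int) : Int :=
  (PySem.List.pyRange 0 n 1).foldl (fun acc _ => acc * 2) 1

-- ===== PRECONDITION & SPEC =====
def Spec_powerset_cardinality (n : Int) (out : Int) : Prop := out = powerset_cardinality_alt n
instance (n : Int) (out : Int) : Decidable (Spec_powerset_cardinality n out) := by unfold Spec_powerset_cardinality; infer_instance

-- ===== CLAIM (what is proved, stated in full; the proofs are below) =====
def Claim_equal_powerset_cardinality : Prop := ∀ (n : Int), Dom_powerset_cardinality n → Spec_powerset_cardinality n (powerset_cardinality n)

-- ===== LEMMAS AND PROOFS =====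

-- ===== VERDICT (by name: the statement is the Claim_ definition above) =====
lemma pvCombos_length (l : List Int) : ∀ r, (pvCombos l r).length = Nat.choose l.length r := by
  induction l with
  | nil => intro r; cases r <;> simp [pvCombos]
  | cons x xs ih =>
    intro r
    cases r with
    | zero => simp [pvCombos]
    | succ r => simp [pvCombos, ih, Nat.choose_succ_succ]

lemma flatMap_combos_length (s : List Int) :
    ((List.range (s.length + 1)).flatMap (fun r => pvCombos s r)).length = 2 ^ s.length := by
  rw [List.length_flatMap]
  have h : (List.range (s.length + 1)).map (fun r => (pvCombos s r).length)
      = (List.range (s.length + 1)).map (fun r => Nat.choose s.length r) := by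
    simp [pvCombos_length]
  rw [h]
  calc ((List.range (s.length + 1)).map (fun r => Nat.choose s.length r)).sum
      = ∑ i ∈ Finset.range (s.length + 1), Nat.choose s.length i := Nat.add_zero _
    _ = 2 ^ s.length := Nat.sum_range_choose s.length

lemma foldl_double (l : List Int) : ∀ c : Int, l.foldl (fun acc _ => acc * 2) c = c * 2 ^ l.length := by
  induction l with
  | nil => intro c; simp
  | cons x xs ih => intro c; simp [List.foldl, ih, pow_succ]; ring

theorem powerset_cardinality_spec : Claim_equal_powerset_cardinality := by
  intro n _
  show (((List.range (((PySem.List.pyRange 0 n 1).length) + 1)).flatMap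
      (fun r => pvCombos (PySem.List.pyRange 0 n 1) r)).length : Int)
    = (PySem.List.pyRange 0 n 1).foldl (fun acc _ => acc * 2) 1
  rw [foldl_double, flatMap_combos_length]
  push_cast
  ring
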